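-- pv_equiv track=rewrite | github.com/kyleblizzard/CopyCatOS | scripts/extract_legion_go_user_guide.py | strip_edge_blanks
-- ===== SOURCE A (Python) =====
-- def strip_edge_blanks(lines: list[str]) -> list[str]:
--     start = 0
--     end = len(lines)
--     while start < end and not lines[start].strip():
--         start += 1
--     while end > start and not lines[end - 1].strip():
--         end -= 1
--     return lines[start:end]
-- ===== SOURCE B (Python) =====
-- def strip_edge_blanks(lines: list[str]) -> list[str]:
--     def drop_blank_prefix(xs: list[str]) -> list[str]:
--         for i, line in enumerate(xs):
--             if line.strip():
--                 return xs[i:]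
--         return []
--     return drop_blank_prefix(drop_blank_prefix(lines[::-1])[::-1])
-- ===== Notes on version B (the rewrite author's own statement) =====
-- stated objective: simpler
-- what changed: Replaces the two index-pointer while loops and a slice with a single prefix-dropping helper applied to the reversed list and back (drop trailing blanks, then leading ones), with no index arithmetic.
import Mathlib
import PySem

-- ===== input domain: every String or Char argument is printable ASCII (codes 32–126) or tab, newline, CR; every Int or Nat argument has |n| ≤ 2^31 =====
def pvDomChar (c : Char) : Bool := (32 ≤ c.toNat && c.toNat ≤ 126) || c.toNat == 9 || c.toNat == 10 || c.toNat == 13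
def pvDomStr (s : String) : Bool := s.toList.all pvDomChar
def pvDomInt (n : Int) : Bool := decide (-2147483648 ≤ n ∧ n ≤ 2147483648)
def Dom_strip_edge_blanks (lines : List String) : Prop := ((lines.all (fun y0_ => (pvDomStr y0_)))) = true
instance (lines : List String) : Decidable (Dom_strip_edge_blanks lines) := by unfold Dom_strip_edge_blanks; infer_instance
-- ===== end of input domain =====

-- B replaces A's two index-pointer while loops + slice with one prefix-dropping helper
-- applied around list reversal (objective: simpler — no index arithmetic).

-- ===== PORT A =====
-- first while loop: advance start past blank lines (getD is exact: the guard keeps start < endv ≤ length)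
def pvLoop1 (lines : List String) (start endv : Nat) : Nat :=
  if h : start < endv ∧ PySem.Str.strip (lines.getD start "") = "" then
    pvLoop1 lines (start + 1) endv
  else start
termination_by endv - start
decreasing_by omega

-- second while loop: retreat end past blank lines (getD is exact: the guard keeps start ≤ endv - 1 < length)
def pvLoop2 (lines : List String) (start endv : Nat) : Nat :=
  if h : start < endv ∧ PySem.Str.strip (lines.getD (endv - 1) "") = "" then
    pvLoop2 lines start (endv - 1)
  else endv
termination_by endv - start
decreasing_by omega

def strip_edge_blanks (lines : List String) : List String :=
  let start := pvLoop1 lines 0 lines.length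
  let endv := pvLoop2 lines start lines.length
  PySem.List.slice lines (some (start : Int)) (some (endv : Int))

-- ===== PORT B =====
-- drop_blank_prefix: return the suffix from the first non-blank line, [] if none
def pvDropBlankPrefix (xs : List String) : List String :=
  match xs with
  | [] => []
  | l :: rest => if PySem.Str.strip l = "" then pvDropBlankPrefix rest else l :: rest

def strip_edge_blanks_alt (lines : List String) : List String :=
  pvDropBlankPrefix ((pvDropBlankPrefix lines.reverse).reverse)

-- ===== PRECONDITION & SPEC =====
def Spec_strip_edge_blanks (lines : List String) (out : List String) : Prop := out = strip_edge_blanks_alt lines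
instance (lines : List String) (out : List String) : Decidable (Spec_strip_edge_blanks lines out) := by unfold Spec_strip_edge_blanks; infer_instance

-- ===== CLAIM (what is proved, stated in full; the proofs are below) =====
def Claim_equal_strip_edge_blanks : Prop := ∀ (lines : List String), Dom_strip_edge_blanks lines → Spec_strip_edge_blanks lines (strip_edge_blanks lines)

-- ===== LEMMAS AND PROOFS =====

-- shorthand for "the line is blank" as a Bool predicate
def pvBl (l : String) : Bool := PySem.Str.strip l == ""

theorem pvDropBlankPrefix_eq_dropWhile (xs : List String) :
    pvDropBlankPrefix xs = xs.dropWhile pvBl := by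
  induction xs with
  | nil => rfl
  | cons l rest ih =>
    simp only [pvDropBlankPrefix, List.dropWhile_cons, pvBl]
    by_cases h : PySem.Str.strip l = "" <;> simp [h, ih]

theorem pv_dropWhile_eq_drop {α : Type} (p : α → Bool) (l : List α) :
    l.dropWhile p = l.drop (l.takeWhile p).length := by
  induction l with
  | nil => rfl
  | cons x xs ih =>
    by_cases h : p x <;> simp [h, ih]

theorem pv_takeWhile_take {α : Type} (p : α → Bool) (l : List α) (k : Nat) :
    (l.take k).takeWhile p = (l.takeWhile p).take k := by
  induction l generalizing k with
  | nil => simp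
  | cons x xs ih =>
    cases k with
    | zero => simp
    | succ k =>
      by_cases h : p x <;> simp [List.take_succ_cons, h, ih]

theorem pv_takeWhile_length_le {α : Type} (p : α → Bool) (l : List α) (i : Nat)
    (hi : i < l.length) (hp : p l[i] = false) : (l.takeWhile p).length ≤ i := by
  induction l generalizing i with
  | nil => simp at hi
  | cons x xs ih =>
    cases i with
    | zero => simp at hp; simp [hp]
    | succ i =>
      by_cases h : p x
      · simp only [List.takeWhile_cons, h, if_true, List.length_cons]
        have := ih i (by simpa using hi) (by simpa using hp)
        omega
      · simp [h]

theorem pvLoop1_eq (lines : List String) (s : Nat) (hs : s ≤ lines.length) :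
    pvLoop1 lines s lines.length = s + ((lines.drop s).takeWhile pvBl).length := by
  by_cases hlt : s < lines.length
  · have hdrop : lines.drop s = lines[s] :: lines.drop (s + 1) :=
      List.drop_eq_getElem_cons hlt
    have hget : lines.getD s "" = lines[s] := by
      simp [List.getD, List.getElem?_eq_getElem hlt]
    rw [hdrop, List.takeWhile_cons]
    by_cases hb : PySem.Str.strip (lines[s]) = ""
    · rw [pvLoop1, dif_pos ⟨hlt, by rw [hget]; exact hb⟩]
      rw [pvLoop1_eq lines (s + 1) (by omega)]
      simp [pvBl, hb]
      omega
    · rw [pvLoop1, dif_neg (by rw [hget]; intro h; exact hb h.2)]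
      simp [pvBl, hb]
  · have hse : s = lines.length := by omega
    subst hse
    rw [pvLoop1]
    simp
termination_by lines.length - s
decreasing_by omega

theorem pvLoop2_eq (lines : List String) (t : Nat) (ht : t < lines.length)
    (hnb : pvBl (lines[t]) = false) (e : Nat) (hte : t < e) (hen : e ≤ lines.length) :
    pvLoop2 lines t e = e - ((lines.take e).reverse.takeWhile pvBl).length := by
  have he1 : e - 1 < lines.length := by omega
  have htake : (lines.take e).reverse = lines[e-1] :: (lines.take (e-1)).reverse := by
    have h2 : lines.take e = lines.take (e-1) ++ [lines[e-1]] := by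
      conv_lhs => rw [show e = (e - 1) + 1 by omega]
      rw [List.take_add_one, List.getElem?_eq_getElem he1]
      rfl
    rw [h2]; simp
  have hget : lines.getD (e-1) "" = lines[e-1] := by
    simp [List.getD, List.getElem?_eq_getElem he1]
  rw [htake, List.takeWhile_cons]
  by_cases hb : PySem.Str.strip (lines[e-1]) = ""
  · have hne : t ≠ e - 1 := by
      intro h
      have heq : lines[t] = lines[e-1] := by subst h; rfl
      simp [pvBl, heq, hb] at hnb
    rw [pvLoop2, dif_pos ⟨hte, by rw [hget]; exact hb⟩]
    rw [pvLoop2_eq lines t ht hnb (e - 1) (by omega) (by omega)]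
    simp [pvBl, hb]
    omega
  · rw [pvLoop2, dif_neg (by rw [hget]; intro h; exact hb h.2)]
    simp [pvBl, hb]
termination_by e - t
decreasing_by omega

theorem pv_getElem_takeWhile_not {α : Type} (p : α → Bool) (l : List α)
    (h : (l.takeWhile p).length < l.length) :
    p (l[(l.takeWhile p).length]'h) = false := by
  induction l with
  | nil => simp at h
  | cons x xs ih =>
    by_cases hx : p x
    · simp only [List.takeWhile_cons, hx, if_true, List.length_cons] at h ⊢
      simp
      exact ih (by omega)
    · simp [hx]

-- ===== VERDICT (by name: the statement is the Claim_ definition above) =====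
theorem strip_edge_blanks_spec : Claim_equal_strip_edge_blanks := by
  intro lines _
  unfold Spec_strip_edge_blanks strip_edge_blanks strip_edge_blanks_alt
  rw [pvDropBlankPrefix_eq_dropWhile, pvDropBlankPrefix_eq_dropWhile]
  show PySem.List.slice lines (some (↑(pvLoop1 lines 0 lines.length) : Int))
        (some (↑(pvLoop2 lines (pvLoop1 lines 0 lines.length) lines.length) : Int))
      = ((lines.reverse.dropWhile pvBl).reverse).dropWhile pvBl
  have hstart : pvLoop1 lines 0 lines.length = (lines.takeWhile pvBl).length := by
    simpa using pvLoop1_eq lines 0 (by omega)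
  rw [hstart]
  have htle : (lines.takeWhile pvBl).length ≤ lines.length :=
    (List.takeWhile_prefix pvBl).length_le
  by_cases hall : (lines.takeWhile pvBl).length = lines.length
  · -- every line is blank: both sides are []
    have hself : lines.takeWhile pvBl = lines :=
      (List.takeWhile_prefix pvBl).eq_of_length hall
    have hallp : ∀ x ∈ lines, pvBl x = true := List.takeWhile_eq_self_iff.mp hself
    have hrev : lines.reverse.dropWhile pvBl = [] :=
      List.dropWhile_eq_nil_iff.mpr (by intro x hx; exact hallp x (List.mem_reverse.mp hx))
    rw [hrev, hall, pvLoop2, dif_neg (by intro h; omega), PySem.List.slice_natCast]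
    simp
  · have htn : (lines.takeWhile pvBl).length < lines.length := by omega
    have hnb : pvBl (lines[(lines.takeWhile pvBl).length]'htn) = false :=
      pv_getElem_takeWhile_not pvBl lines htn
    have hun : (lines.reverse.takeWhile pvBl).length ≤
        lines.length - (lines.takeWhile pvBl).length - 1 := by
      have hidx : lines.length - 1 - (lines.takeWhile pvBl).length < lines.reverse.length := by
        simp; omega
      have heq : lines.reverse[lines.length - 1 - (lines.takeWhile pvBl).length]'hidx
          = lines[(lines.takeWhile pvBl).length]'htn := by
        rw [List.getElem_reverse]
        congr 1
        omega
      have := pv_takeWhile_length_le pvBl lines.reverse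
        (lines.length - 1 - (lines.takeWhile pvBl).length) hidx (by rw [heq]; exact hnb)
      omega
    rw [pvLoop2_eq lines (lines.takeWhile pvBl).length htn hnb lines.length (by omega) le_rfl,
        List.take_length, PySem.List.slice_natCast]
    rw [pv_dropWhile_eq_drop pvBl lines.reverse, List.drop_reverse, List.reverse_reverse,
        pv_dropWhile_eq_drop, pv_takeWhile_take, List.length_take,
        Nat.min_eq_right (by omega), List.drop_take]
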